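-- pv_equiv track=rewrite | github.com/JerryPeng0112/advent_of_code_2018 | day7/q1.py | buildStepRelations
-- ===== SOURCE A (Python) =====
-- def buildStepRelations(data):
--     stepToTake = {}
--     stepDependOn = {}
--
--     for d in data:
--
--         if d[0] not in stepToTake:
--             stepToTake[d[0]] = [d[1]]
--
--         else:
--             stepToTake[d[0]].append(d[1])
--
--     for d in data:
--         if d[1] not in stepDependOn:
--             stepDependOn[d[1]] = [d[0]]
--         else:
--             stepDependOn[d[1]].append(d[0])
--
--     return stepToTake, stepDependOn
-- ===== SOURCE B (Python) =====
-- def buildStepRelations(data):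
--     def group(pairs):
--         keys = list(dict.fromkeys(k for k, _ in pairs))
--         return {k: [v for kk, v in pairs if kk == k] for k in keys}
--     return group(data), group([(b, a) for (a, b) in data])
-- ===== Notes on version B (the rewrite author's own statement) =====
-- stated objective: alternative
-- what changed: Replaces A's incremental dict accumulation (per-edge membership test and insert/append) with a gather-by-key strategy: dedup the keys in first-occurrence order, then build each dict by scanning the edge list once per distinct key with a comprehension.
import Mathlib
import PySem

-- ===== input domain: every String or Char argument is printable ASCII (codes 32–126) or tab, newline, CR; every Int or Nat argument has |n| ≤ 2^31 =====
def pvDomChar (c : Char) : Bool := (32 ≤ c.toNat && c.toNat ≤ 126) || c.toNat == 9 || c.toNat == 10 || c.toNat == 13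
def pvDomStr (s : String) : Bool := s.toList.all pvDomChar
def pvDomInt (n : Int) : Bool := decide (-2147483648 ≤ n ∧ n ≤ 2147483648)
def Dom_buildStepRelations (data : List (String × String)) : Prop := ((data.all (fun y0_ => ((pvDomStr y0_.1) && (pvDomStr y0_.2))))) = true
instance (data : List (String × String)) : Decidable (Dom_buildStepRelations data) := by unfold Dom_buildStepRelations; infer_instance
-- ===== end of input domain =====

-- B gathers values per distinct key (dedup keys, then one comprehension scan per key) instead of A's incremental dict accumulation (alternative decomposition, not faster).

-- ===== PORT A =====
-- Two separate loops over data; each tests membership and either inserts a fresh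
-- singleton list or appends to the existing one (append-in-place = Dict.modify with the key present).
def buildStepRelations (data : List (String × String)) : (List (String × List String)) × (List (String × List String)) :=
  let stepToTake := data.foldl (fun m d =>
    if m.contains d.1 = false then m.insert d.1 [d.2]
    else m.modify d.1 [] (fun l => l ++ [d.2])) PySem.Dict.empty
  let stepDependOn := data.foldl (fun m d =>
    if m.contains d.2 = false then m.insert d.2 [d.1]
    else m.modify d.2 [] (fun l => l ++ [d.1])) PySem.Dict.empty
  (stepToTake.items, stepDependOn.items)

-- ===== PORT B =====
-- group(pairs): keys = list(dict.fromkeys(firsts)) = PySem.List.dedup; the dict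
-- comprehension ranges over these DISTINCT keys in order, so its items are exactly
-- this map of (k, [v for kk, v in pairs if kk == k]).
def pvGroup (pairs : List (String × String)) : List (String × List String) :=
  (PySem.List.dedup (pairs.map (·.1))).map
    (fun k => (k, (pairs.filter (fun p => p.1 == k)).map (·.2)))

def buildStepRelations_alt (data : List (String × String)) : (List (String × List String)) × (List (String × List String)) :=
  (pvGroup data, pvGroup (data.map (fun p => (p.2, p.1))))

-- ===== PRECONDITION & SPEC =====
def Spec_buildStepRelations (data : List (String × String)) (out : (List (String × List String)) × (List (String × List String))) : Prop := out = buildStepRelations_alt data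
instance (data : List (String × String)) (out : (List (String × List String)) × (List (String × List String))) : Decidable (Spec_buildStepRelations data out) := by unfold Spec_buildStepRelations; infer_instance

-- ===== CLAIM =====
def Claim_equal_buildStepRelations : Prop := ∀ (data : List (String × String)), Dom_buildStepRelations data → Spec_buildStepRelations data (buildStepRelations data)

-- ===== LEMMAS AND PROOFS =====
-- A's branchy update step is pointwise the setdefault/append step (modify with default []).
theorem pv_step_eq (m : PySem.Dict String (List String)) (k v : String) :
    (if m.contains k = false then m.insert k [v] else m.modify k [] (fun l => l ++ [v]))
      = m.modify k [] (fun l => l ++ [v]) := by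
  by_cases h : m.contains k = false
  · simp [h, PySem.Dict.modify, PySem.Dict.getD_of_not_contains m [] h]
  · simp [h]

-- A dict with Nodup keys is its key list zipped with its stored values.
theorem items_eq_keys_map {κ ν : Type} [BEq κ] [LawfulBEq κ] (d : PySem.Dict κ ν) (dflt : ν)
    (h : d.keys.Nodup) : d.items = d.keys.map (fun k => (k, d.getD k dflt)) := by
  obtain ⟨l⟩ := d
  simp only [PySem.Dict.keys] at h ⊢
  induction l with
  | nil => simp
  | cons p rest ih =>
    obtain ⟨k, v⟩ := p
    simp only [List.map_cons, List.nodup_cons] at h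
    have hhead : (PySem.Dict.mk ((k, v) :: rest)).getD k dflt = v := by
      simp [PySem.Dict.getD, PySem.Dict.get?_mk_cons]
    have htail : (rest.map (fun x => x.1)).map
          (fun k' => (k', (PySem.Dict.mk ((k, v) :: rest)).getD k' dflt))
        = (rest.map (fun x => x.1)).map
          (fun k' => (k', (PySem.Dict.mk rest).getD k' dflt)) := by
      apply List.map_congr_left
      intro k' hk'
      have hne : (k == k') = false := by
        refine beq_eq_false_iff_ne.mpr ?_
        intro e; exact h.1 (e ▸ hk')
      simp [PySem.Dict.getD, PySem.Dict.get?_mk_cons, hne]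
    calc ((k, v) :: rest : List (κ × ν))
        = (k, v) :: (rest.map (fun x => x.1)).map
            (fun k' => (k', (PySem.Dict.mk rest).getD k' dflt)) := by
          rw [← ih h.2]
      _ = _ := by simp only [List.map_cons]; simp [hhead, htail]

-- A's accumulation loop produces exactly the gather-by-key result.
theorem groupA (pairs : List (String × String)) :
    (pairs.foldl (fun m p => m.modify p.1 [] (fun l => l ++ [p.2])) PySem.Dict.empty).items
      = pvGroup pairs := by
  have hk : (pairs.foldl (fun m p => m.modify p.1 [] (fun l => l ++ [p.2])) PySem.Dict.empty).keys
      = PySem.List.dedup (pairs.map (·.1)) := by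
    rw [PySem.Dict.keys_foldl_modify_key pairs (fun p => p.1) []
      (fun _ p => fun l => l ++ [p.2]) PySem.Dict.empty]
    simp [PySem.Dict.keys_empty, PySem.Set.update_nil_left, PySem.List.dedup_eq_ofList]
  have hn := PySem.Dict.nodup_keys_foldl_modify_key pairs (fun p => p.1) []
    (fun _ p => fun l => l ++ [p.2]) PySem.Dict.empty PySem.Dict.nodup_keys_empty
  rw [items_eq_keys_map _ [] hn, hk]
  unfold pvGroup
  apply List.map_congr_left
  intro k _
  rw [PySem.Dict.getD_foldl_modify_append pairs PySem.Dict.empty k]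
  simp [PySem.Dict.getD_empty]

-- ===== VERDICT =====
theorem buildStepRelations_spec : Claim_equal_buildStepRelations := by
  intro data _
  unfold Spec_buildStepRelations buildStepRelations buildStepRelations_alt
  have h1 : (fun (m : PySem.Dict String (List String)) (d : String × String) =>
      if m.contains d.1 = false then m.insert d.1 [d.2]
      else m.modify d.1 [] (fun l => l ++ [d.2]))
      = fun m d => m.modify d.1 [] (fun l => l ++ [d.2]) := by
    funext m d; exact pv_step_eq m d.1 d.2
  have h2 : (fun (m : PySem.Dict String (List String)) (d : String × String) =>
      if m.contains d.2 = false then m.insert d.2 [d.1]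
      else m.modify d.2 [] (fun l => l ++ [d.1]))
      = fun m d => m.modify d.2 [] (fun l => l ++ [d.1]) := by
    funext m d; exact pv_step_eq m d.2 d.1
  simp only [h1, h2]
  have hswap : data.foldl (fun (m : PySem.Dict String (List String)) d => m.modify d.2 [] (fun l => l ++ [d.1])) PySem.Dict.empty
      = (data.map (fun p => (p.2, p.1))).foldl (fun m p => m.modify p.1 [] (fun l => l ++ [p.2])) PySem.Dict.empty := by
    rw [List.foldl_map]
  rw [hswap, groupA, groupA]
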